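-- pv_equiv track=rewrite | github.com/Parth844/AI_pdf_to_Epub | app/utils/chapter_splitter.py | split_into_chapters
-- ===== SOURCE A (Python) =====
-- def is_chapter_start(paragraphs, index):
--     if index + 1 >= len(paragraphs):
--         return False
--
--     first = paragraphs[index].strip()
--     second = paragraphs[index + 1].strip()
--
--     return (
--         len(first) == 1
--         and first.isupper()
--         and len(second.split()) > 1
--     )
--
-- def format_paragraph(p):
--     p = p.strip()
--
--     if not p:
--         return ""
--
--     # Scene break
--     if p in ["*", "***", "—", "- - -"]:
--         return '<p class="scene-break">***</p>'
--
--     # Dialogue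
--     if p.startswith('"') or p.startswith("“"):
--         return f'<p class="dialogue">{p}</p>'
--
--     # Quote block
--     if p.startswith("“") and p.endswith("”"):
--         return f'<blockquote>{p}</blockquote>'
--
--     # Short poetic lines
--     if len(p.split()) <= 6:
--         return f'<p class="short-line">{p}</p>'
--
--     return f'<p class="para">{p}</p>'
--
-- def split_into_chapters(paragraphs):
--
--     chapters = []
--     current_title = None
--     current_content = []
--
--     i = 0
--
--     while i < len(paragraphs):
--
--         if is_chapter_start(paragraphs, i):
--
--             if current_title:
--                 chapters.append((current_title, current_content))
--
--             letter = paragraphs[i].strip()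
--             title_line = paragraphs[i + 1].strip()
--
--             current_title = f"{letter} {title_line}"
--             current_content = []
--
--             i += 2
--             continue
--
--         # If no chapter started yet → treat as front matter
--         if current_title is None:
--             if not chapters:
--                 current_title = "Front Matter"
--                 current_content = []
--
--         current_content.append(format_paragraph(paragraphs[i]))
--         i += 1
--
--     if current_content:
--         chapters.append((current_title, current_content))
--
--     return chapters
-- ===== SOURCE B (Python) =====
-- def is_chapter_start(paragraphs, index):
--     if index + 1 >= len(paragraphs):
--         return False
--
--     first = paragraphs[index].strip()
--     second = paragraphs[index + 1].strip()
--
--     return (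
--         len(first) == 1
--         and first.isupper()
--         and len(second.split()) > 1
--     )
--
-- def format_paragraph(p):
--     p = p.strip()
--
--     if not p:
--         return ""
--
--     # Scene break
--     if p in ["*", "***", "—", "- - -"]:
--         return '<p class="scene-break">***</p>'
--
--     # Dialogue
--     if p.startswith('"') or p.startswith("“"):
--         return f'<p class="dialogue">{p}</p>'
--
--     # Quote block
--     if p.startswith("“") and p.endswith("”"):
--         return f'<blockquote>{p}</blockquote>'
--
--     # Short poetic lines
--     if len(p.split()) <= 6:
--         return f'<p class="short-line">{p}</p>'
--
--     return f'<p class="para">{p}</p>'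
--
-- def split_into_chapters(paragraphs):
--     # B: two-pass decomposition — collect chapter-start indices, then slice segments.
--     n = len(paragraphs)
--     starts = [i for i in range(n) if is_chapter_start(paragraphs, i)]
--     chapters = []
--     first_bound = starts[0] if starts else n
--     front = [format_paragraph(p) for p in paragraphs[:first_bound]]
--     if front:
--         chapters.append(("Front Matter", front))
--     for k, s in enumerate(starts):
--         end = starts[k + 1] if k + 1 < len(starts) else n
--         title = paragraphs[s].strip() + " " + paragraphs[s + 1].strip()
--         content = [format_paragraph(p) for p in paragraphs[s + 2:end]]
--         if k + 1 < len(starts) or content: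
--             chapters.append((title, content))
--     return chapters
-- ===== Notes on version B (the rewrite author's own statement) =====
-- stated objective: alternative
-- what changed: A's single stateful while-loop (mutable current_title/current_content with in-loop flushing) is replaced by a two-pass decomposition: collect all chapter-start indices first, then slice the paragraph list into front matter plus one (title, content) segment per start.
import Mathlib
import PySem

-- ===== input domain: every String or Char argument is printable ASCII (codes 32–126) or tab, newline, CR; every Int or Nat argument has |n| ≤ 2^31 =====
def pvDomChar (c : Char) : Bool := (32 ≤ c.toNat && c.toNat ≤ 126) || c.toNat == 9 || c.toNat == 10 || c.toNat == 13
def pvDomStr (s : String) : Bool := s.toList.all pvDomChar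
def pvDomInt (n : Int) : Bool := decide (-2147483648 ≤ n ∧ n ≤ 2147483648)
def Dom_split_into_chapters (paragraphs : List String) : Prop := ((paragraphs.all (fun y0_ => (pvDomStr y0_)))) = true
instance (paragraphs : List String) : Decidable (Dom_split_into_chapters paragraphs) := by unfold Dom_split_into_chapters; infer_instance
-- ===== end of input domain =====

-- B replaces A's single mutable-state loop by a two-pass decomposition (collect chapter-start
-- indices, then slice segments); objective: alternative structure, same asymptotic cost.


-- ===== PORT A =====

-- Python str.isupper(): at least one cased character and no lowercase one (exact on the ASCII domain,
-- where the cased characters are exactly a-z / A-Z).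
def py_isupper (s : String) : Bool :=
  s.toList.any (fun c => PySem.Chars.isupper c || PySem.Chars.islower c) &&
  s.toList.all (fun c => !PySem.Chars.islower c)

-- helper is_chapter_start(paragraphs, index); the callers only pass 0 ≤ index, exactly as in Python,
-- and every access is guarded in range, so getD never supplies its default.
def is_chapter_start_py (paragraphs : List String) (index : Nat) : Bool :=
  if paragraphs.length ≤ index + 1 then false
  else
    let first := PySem.Str.strip (paragraphs.getD index "")
    let second := PySem.Str.strip (paragraphs.getD (index + 1) "")
    (PySem.Str.len first == 1) && py_isupper first && decide ((PySem.Str.split₀ second).length > 1)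

-- helper format_paragraph(p)
def format_paragraph_py (p0 : String) : String :=
  let p := PySem.Str.strip p0
  if p == "" then ""
  else if p == "*" || p == "***" || p == "—" || p == "- - -" then "<p class=\"scene-break\">***</p>"
  else if PySem.Str.startswith p "\"" || PySem.Str.startswith p "“" then "<p class=\"dialogue\">" ++ p ++ "</p>"
  else if PySem.Str.startswith p "“" && PySem.Str.endswith p "”" then "<blockquote>" ++ p ++ "</blockquote>"
  else if (PySem.Str.split₀ p).length ≤ 6 then "<p class=\"short-line\">" ++ p ++ "</p>"
  else "<p class=\"para\">" ++ p ++ "</p>"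

-- Python truthiness of current_title (None or str)
def pyTruthyOpt (t : Option String) : Bool :=
  match t with
  | none => false
  | some s => !(s == "")

-- the while loop of A, state = (chapters, current_title, current_content), index i.
-- In the final 'if current_content:' append Python reads current_title, which is a string whenever
-- current_content is non-empty; 'title.getD ""' is that read (the default is never used there).
def splitLoopA (paragraphs : List String) (chapters : List (String × List String))
    (title : Option String) (content : List String) (i : Nat) : List (String × List String) :=
  if _h : i < paragraphs.length then
    if is_chapter_start_py paragraphs i then
      let chapters' := if pyTruthyOpt title then chapters ++ [(title.getD "", content)] else chapters
      let letter := PySem.Str.strip (paragraphs.getD i "")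
      let title_line := PySem.Str.strip (paragraphs.getD (i + 1) "")
      splitLoopA paragraphs chapters' (some (letter ++ " " ++ title_line)) [] (i + 2)
    else
      let st : Option String × List String :=
        if title = none then
          (if chapters = [] then (some "Front Matter", ([] : List String)) else (title, content))
        else (title, content)
      splitLoopA paragraphs chapters st.1 (st.2 ++ [format_paragraph_py (paragraphs.getD i "")]) (i + 1)
  else
    if content = [] then chapters else chapters ++ [(title.getD "", content)]
termination_by paragraphs.length - i
decreasing_by all_goals omega

def split_into_chapters (paragraphs : List String) : List (String × List String) :=
  splitLoopA paragraphs [] none [] 0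

-- ===== PORT B =====

-- the 'for k, s in enumerate(starts)' pass of B: each start with the next start (or n) as its end
def buildChaps (paragraphs : List String) (n : Nat) : List Nat → List (String × List String)
  | [] => []
  | s :: rest =>
    let e := rest.headD n
    let title := PySem.Str.strip (paragraphs.getD s "") ++ " " ++ PySem.Str.strip (paragraphs.getD (s + 1) "")
    let content := ((paragraphs.take e).drop (s + 2)).map format_paragraph_py   -- paragraphs[s+2:e]
    match rest with
    | [] => if content = [] then [] else [(title, content)]
    | _ :: _ => (title, content) :: buildChaps paragraphs n rest

def split_into_chapters_alt (paragraphs : List String) : List (String × List String) :=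
  let n := paragraphs.length
  let starts := (List.range n).filter (fun i => is_chapter_start_py paragraphs i)
  let front := (paragraphs.take (starts.headD n)).map format_paragraph_py      -- paragraphs[:first_bound]
  (if front = [] then [] else [("Front Matter", front)]) ++ buildChaps paragraphs n starts

-- ===== PRECONDITION & SPEC =====
def Spec_split_into_chapters (paragraphs : List String) (out : List (String × List String)) : Prop := out = split_into_chapters_alt paragraphs
instance (paragraphs : List String) (out : List (String × List String)) : Decidable (Spec_split_into_chapters paragraphs out) := by unfold Spec_split_into_chapters; infer_instance

-- ===== CLAIM (what is proved, stated in full; the proofs are below) =====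
def Claim_equal_split_into_chapters : Prop := ∀ (paragraphs : List String), Dom_split_into_chapters paragraphs → Spec_split_into_chapters paragraphs (split_into_chapters paragraphs)

-- ===== LEMMAS AND PROOFS =====

-- chapter-start indices from position i on
def startsFrom (ps : List String) (i : Nat) : List Nat :=
  (List.range' i (ps.length - i)).filter (fun j => is_chapter_start_py ps j)

-- formatted paragraphs ps[i:b]
def fmts (ps : List String) (i b : Nat) : List String :=
  ((ps.take b).drop i).map format_paragraph_py

-- a word-split of a one-character string has at most one word
theorem split₀_singleton_le (c : Char) : (PySem.Chars.split₀ [c]).length ≤ 1 := by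
  simp [PySem.Chars.split₀, PySem.Chars.split₀.go]
  split_ifs <;> simp

theorem str_split₀_len_one (s : String) (h : PySem.Str.len s = 1) :
    (PySem.Str.split₀ s).length ≤ 1 := by
  have h1 : s.toList.length = 1 := by have := PySem.Str.len_eq s; omega
  obtain ⟨c, hc⟩ := List.length_eq_one_iff.mp h1
  have h2 : (PySem.Str.split₀ s).length = (PySem.Chars.split₀ s.toList).length := by
    simp [PySem.Str.split₀]
  rw [h2, hc]
  exact split₀_singleton_le c

-- two adjacent indices are never both chapter starts
theorem noAdj (ps : List String) (s : Nat) (h : is_chapter_start_py ps s = true) :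
    is_chapter_start_py ps (s + 1) = false := by
  unfold is_chapter_start_py at h ⊢
  by_cases hl : ps.length ≤ s + 1
  · simp [hl] at h
  · simp only [if_neg hl] at h
    by_cases hl2 : ps.length ≤ s + 1 + 1
    · simp [hl2]
    · simp only [if_neg hl2]
      simp only [Bool.and_eq_true, beq_iff_eq, decide_eq_true_eq] at h
      obtain ⟨⟨-, -⟩, hsplit⟩ := h
      simp only [Bool.and_eq_false_iff]
      left; left
      have hc := str_split₀_len_one (PySem.Str.strip (ps.getD (s + 1) ""))
      by_cases hlen : PySem.Str.len (PySem.Str.strip (ps.getD (s + 1) "")) = 1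
      · exact absurd (hc hlen) (by omega)
      · simpa only [beq_eq_false_iff_ne, ne_eq] using hlen

theorem startsFrom_stop (ps : List String) (i : Nat) (h : ps.length ≤ i) :
    startsFrom ps i = [] := by
  unfold startsFrom
  rw [Nat.sub_eq_zero_of_le h]
  simp

theorem startsFrom_step (ps : List String) (i : Nat) (h : i < ps.length) :
    startsFrom ps i =
      if is_chapter_start_py ps i then i :: startsFrom ps (i + 1) else startsFrom ps (i + 1) := by
  unfold startsFrom
  have : ps.length - i = (ps.length - (i + 1)) + 1 := by omega
  rw [this, List.range'_succ, List.filter_cons]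

theorem mem_startsFrom_ge (ps : List String) (i x : Nat) (h : x ∈ startsFrom ps i) :
    i ≤ x ∧ x < ps.length := by
  unfold startsFrom at h
  have := List.mem_filter.mp h |>.1
  have := List.mem_range'_1.mp this
  omega

theorem lt_headD_startsFrom (ps : List String) (i : Nat) (hi : i < ps.length)
    (hst : is_chapter_start_py ps i = false) :
    i < (startsFrom ps i).headD ps.length := by
  cases hs : startsFrom ps i with
  | nil => simpa using hi
  | cons a l =>
    have hm : a ∈ startsFrom ps i := by rw [hs]; exact List.mem_cons_self
    have hg := mem_startsFrom_ge ps i a hm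
    have hp : is_chapter_start_py ps a = true := (List.mem_filter.mp (by unfold startsFrom at hm; exact hm)).2
    have : a ≠ i := fun h => by rw [h] at hp; rw [hp] at hst; exact Bool.true_eq_false.mp hst
    simp only [List.headD_cons]
    omega

-- the tail of the open-chapter bookkeeping at: if more starts follow, append unconditionally,
-- otherwise only a non-empty chapter
def closeOpen (t : String) (c : List String) (more : Bool) : List (String × List String) :=
  if more then [(t, c)] else if c = [] then [] else [(t, c)]

theorem append_space_ne (a b : String) : a ++ " " ++ b ≠ "" := by
  intro h
  have := congrArg String.toList h
  simp at this

theorem closeOpen_ne_nil (t : String) (c : List String) (m : Bool) (h : c ≠ []) :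
    closeOpen t c m = [(t, c)] := by
  unfold closeOpen
  cases m <;> simp [h]

theorem buildChaps_cons (ps : List String) (n s : Nat) (rest : List Nat) :
    buildChaps ps n (s :: rest) =
      closeOpen (PySem.Str.strip (ps.getD s "") ++ " " ++ PySem.Str.strip (ps.getD (s + 1) ""))
        (((ps.take (rest.headD n)).drop (s + 2)).map format_paragraph_py) (!rest.isEmpty) ++
      buildChaps ps n rest := by
  cases rest with
  | nil => simp [buildChaps, closeOpen]
  | cons b l => simp [buildChaps, closeOpen]

theorem fmts_nil (ps : List String) (i b : Nat) (h : min b ps.length ≤ i) : fmts ps i b = [] := by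
  unfold fmts
  rw [List.drop_eq_nil_iff.mpr (by simpa using h)]
  rfl

theorem fmts_cons (ps : List String) (i b : Nat) (hi : i < ps.length) (hb : i < b) :
    fmts ps i b = format_paragraph_py (ps.getD i "") :: fmts ps (i + 1) b := by
  unfold fmts
  have hlt : i < (ps.take b).length := by simp; omega
  rw [List.drop_eq_getElem_cons hlt]
  simp [List.getElem_take, List.getD_eq_getElem?_getD, List.getElem?_eq_getElem hi]

theorem startsFrom_skip (ps : List String) (i : Nat) (h : is_chapter_start_py ps i = true) :
    startsFrom ps (i + 1) = startsFrom ps (i + 2) := by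
  by_cases hl : i + 1 < ps.length
  · rw [startsFrom_step ps (i + 1) hl, noAdj ps i h]
    simp
  · rw [startsFrom_stop ps (i + 1) (by omega), startsFrom_stop ps (i + 2) (by omega)]

-- one non-recursive step of the loop equations
theorem loopA_done (ps : List String) (chapters : List (String × List String))
    (t : String) (content : List String) (i : Nat) (h : ps.length ≤ i) :
    splitLoopA ps chapters (some t) content i =
      chapters ++
        closeOpen t (content ++ fmts ps i ((startsFrom ps i).headD ps.length))
          (!(startsFrom ps i).isEmpty) ++
        buildChaps ps ps.length (startsFrom ps i) := by
  rw [splitLoopA, dif_neg (by omega), startsFrom_stop ps i h,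
    fmts_nil ps i _ (by simp; omega)]
  simp [buildChaps, closeOpen]
  split <;> simp_all

-- MAIN loop invariant: with an open chapter (some t, content) at index i the loop closes it at the
-- next start (or the end) and continues exactly as buildChaps on the remaining start indices
theorem loopA_main (ps : List String) (k : Nat) :
    ∀ i t content chapters, ps.length - i ≤ k → t ≠ "" →
      splitLoopA ps chapters (some t) content i =
        chapters ++
          closeOpen t (content ++ fmts ps i ((startsFrom ps i).headD ps.length))
            (!(startsFrom ps i).isEmpty) ++
          buildChaps ps ps.length (startsFrom ps i) := by
  induction k with
  | zero =>
    intro i t content chapters hk ht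
    exact loopA_done ps chapters t content i (by omega)
  | succ k ih =>
    intro i t content chapters hk ht
    by_cases hi : i < ps.length
    · rw [splitLoopA, dif_pos hi]
      by_cases hst : is_chapter_start_py ps i = true
      · rw [if_pos hst]
        have htt : pyTruthyOpt (some t) = true := by simp [pyTruthyOpt, ht]
        rw [htt]
        have ht' : PySem.Str.strip (ps.getD i "") ++ " " ++ PySem.Str.strip (ps.getD (i + 1) "") ≠ "" :=
          append_space_ne _ _
        rw [ih (i + 2) _ [] _ (by omega) ht']
        have hsf : startsFrom ps i = i :: startsFrom ps (i + 2) := by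
          rw [startsFrom_step ps i hi, if_pos hst, startsFrom_skip ps i hst]
        rw [hsf, buildChaps_cons]
        have hfi : fmts ps i ((i :: startsFrom ps (i + 2)).headD ps.length) = [] :=
          fmts_nil ps i i (by simp)
        rw [hfi]
        simp [closeOpen, fmts]
      · rw [if_neg hst]
        have hni : ¬ ((some t : Option String) = none) := by simp
        rw [if_neg hni]
        rw [ih (i + 1) t _ chapters (by omega) ht]
        have hsf : startsFrom ps i = startsFrom ps (i + 1) := by
          rw [startsFrom_step ps i hi, if_neg (by simp [hst])]
        rw [← hsf]
        have hib : i < (startsFrom ps i).headD ps.length :=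
          lt_headD_startsFrom ps i hi (by simpa using hst)
        rw [fmts_cons ps i _ hi hib]
        simp
    · exact loopA_done ps chapters t content i (by omega)

-- FRONT invariant: from the initial state (no chapter open, nothing emitted)
theorem loopA_front (ps : List String) (i : Nat) :
    splitLoopA ps [] none [] i =
      (if fmts ps i ((startsFrom ps i).headD ps.length) = [] then []
       else [("Front Matter", fmts ps i ((startsFrom ps i).headD ps.length))]) ++
      buildChaps ps ps.length (startsFrom ps i) := by
  by_cases hi : i < ps.length
  · rw [splitLoopA, dif_pos hi]
    by_cases hst : is_chapter_start_py ps i = true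
    · rw [if_pos hst]
      have htt : pyTruthyOpt none = false := rfl
      rw [htt]
      have ht' : PySem.Str.strip (ps.getD i "") ++ " " ++ PySem.Str.strip (ps.getD (i + 1) "") ≠ "" :=
        append_space_ne _ _
      rw [if_neg (by simp)]
      rw [loopA_main ps (ps.length - (i + 2)) (i + 2) _ [] [] (by omega) ht']
      have hsf : startsFrom ps i = i :: startsFrom ps (i + 2) := by
        rw [startsFrom_step ps i hi, if_pos hst, startsFrom_skip ps i hst]
      rw [hsf, buildChaps_cons]
      have hfi : fmts ps i ((i :: startsFrom ps (i + 2)).headD ps.length) = [] :=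
        fmts_nil ps i i (by simp)
      rw [hfi]
      simp [closeOpen, fmts]
    · rw [if_neg hst]
      rw [if_pos rfl, if_pos rfl]
      rw [loopA_main ps (ps.length - (i + 1)) (i + 1) "Front Matter" _ [] (by omega) (by decide)]
      have hsf : startsFrom ps i = startsFrom ps (i + 1) := by
        rw [startsFrom_step ps i hi, if_neg (by simp [hst])]
      rw [← hsf]
      have hib : i < (startsFrom ps i).headD ps.length :=
        lt_headD_startsFrom ps i hi (by simpa using hst)
      rw [fmts_cons ps i _ hi hib]
      rw [closeOpen_ne_nil _ _ _ (by simp)]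
      simp
  · rw [splitLoopA, dif_neg (by omega), startsFrom_stop ps i (by omega),
      fmts_nil ps i _ (by simp; omega)]
    simp [buildChaps]

-- ===== VERDICT (by name: the statement is the Claim_ definition above) =====
theorem split_into_chapters_spec : Claim_equal_split_into_chapters := by
  intro ps _
  unfold Spec_split_into_chapters split_into_chapters split_into_chapters_alt
  have h0 : (List.range ps.length).filter (fun i => is_chapter_start_py ps i) = startsFrom ps 0 := by
    unfold startsFrom
    rw [List.range_eq_range']
    simp
  dsimp only
  rw [h0, loopA_front ps 0]
  have h1 : fmts ps 0 ((startsFrom ps 0).headD ps.length) =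
      (ps.take ((startsFrom ps 0).headD ps.length)).map format_paragraph_py := by
    unfold fmts; rfl
  rw [h1]
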